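-- pv_equiv track=rewrite | github.com/codentell/deployml | src/deployml/notebook/stack.py | _detect_deployment_type
-- ===== SOURCE A (Python) =====
-- from typing import Dict, Any, Optional
--
-- def _detect_deployment_type(outputs: Dict[str, Any]) -> str:
--     """Detect whether this is a cloud_vm or cloud_run deployment"""
--     vm_indicators = ['vm_external_ip', 'ssh_command', 'docker_commands']
--     cloud_run_indicators = ['cloud_run_url', 'service_url']
--
--     vm_score = sum(1 for indicator in vm_indicators if any(indicator in key.lower() for key in outputs.keys()))
--     cloud_run_score = sum(1 for indicator in cloud_run_indicators if any(indicator in key.lower() for key in outputs.keys()))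
--
--     if vm_score > cloud_run_score:
--         return "cloud_vm"
--     elif cloud_run_score > vm_score:
--         return "cloud_run"
--     else:
--         return "generic"
-- ===== SOURCE B (Python) =====
-- def _detect_deployment_type(outputs):
--     """Detect whether this is a cloud_vm or cloud_run deployment"""
--     vm_indicators = ['vm_external_ip', 'ssh_command', 'docker_commands']
--     cloud_run_indicators = ['cloud_run_url', 'service_url']
--
--     vm_found = set()
--     cloud_run_found = set()
--     for key in outputs.keys():
--         low = key.lower()
--         for indicator in vm_indicators:
--             if indicator in low:
--                 vm_found.add(indicator)
--         for indicator in cloud_run_indicators: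
--             if indicator in low:
--                 cloud_run_found.add(indicator)
--
--     vm_score = len(vm_found)
--     cloud_run_score = len(cloud_run_found)
--
--     if vm_score > cloud_run_score:
--         return "cloud_vm"
--     elif cloud_run_score > vm_score:
--         return "cloud_run"
--     else:
--         return "generic"
-- ===== Notes on version B (the rewrite author's own statement) =====
-- stated objective: alternative
-- what changed: Inverts the loop nesting: one pass over the keys (each key lowercased once), maintaining sets of found indicators, instead of A's per-indicator any() scans that re-lowercase every key for each indicator; scores are the set sizes.
import Mathlib
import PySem

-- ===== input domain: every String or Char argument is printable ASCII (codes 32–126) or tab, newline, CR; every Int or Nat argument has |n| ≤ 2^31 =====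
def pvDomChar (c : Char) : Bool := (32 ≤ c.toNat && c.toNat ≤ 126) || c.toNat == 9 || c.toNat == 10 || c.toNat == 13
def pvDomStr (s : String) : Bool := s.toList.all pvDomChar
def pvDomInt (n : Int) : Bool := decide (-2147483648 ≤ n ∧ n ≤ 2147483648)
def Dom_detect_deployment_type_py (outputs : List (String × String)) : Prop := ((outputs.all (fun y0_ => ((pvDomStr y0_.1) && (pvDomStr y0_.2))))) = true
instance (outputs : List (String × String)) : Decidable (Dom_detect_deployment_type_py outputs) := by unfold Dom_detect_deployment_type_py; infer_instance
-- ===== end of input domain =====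

-- B inverts the loop nesting (one pass over the keys, maintaining sets of found indicators)
-- instead of A's per-indicator any() scans over all keys; same cost, alternative decomposition.

-- ===== PORT A =====
-- literal transliteration of A: per-indicator sum of any(indicator in key.lower() for key in keys)
def detect_deployment_type_py (outputs : List (String × String)) : String :=
  let vm_indicators : List String := ["vm_external_ip", "ssh_command", "docker_commands"]
  let cloud_run_indicators : List String := ["cloud_run_url", "service_url"]
  let keys := (PySem.Dict.ofList outputs).keys
  let vm_score := vm_indicators.foldl (fun (acc : Int) indicator =>
    if keys.any (fun key => PySem.Str.isIn indicator (PySem.Str.lower key)) then acc + 1 else acc) 0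
  let cloud_run_score := cloud_run_indicators.foldl (fun (acc : Int) indicator =>
    if keys.any (fun key => PySem.Str.isIn indicator (PySem.Str.lower key)) then acc + 1 else acc) 0
  if vm_score > cloud_run_score then "cloud_vm"
  else if cloud_run_score > vm_score then "cloud_run"
  else "generic"

-- ===== PORT B =====
-- literal transliteration of B: one pass over keys, each key lowered once, sets of found indicators
def detect_deployment_type_py_alt (outputs : List (String × String)) : String :=
  let vm_indicators : List String := ["vm_external_ip", "ssh_command", "docker_commands"]
  let cloud_run_indicators : List String := ["cloud_run_url", "service_url"]
  let found := ((PySem.Dict.ofList outputs).keys).foldl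
    (fun (st : PySem.Set String × PySem.Set String) key =>
      let low := PySem.Str.lower key
      let v := vm_indicators.foldl (fun s indicator =>
        if PySem.Str.isIn indicator low then PySem.Set.add s indicator else s) st.1
      let c := cloud_run_indicators.foldl (fun s indicator =>
        if PySem.Str.isIn indicator low then PySem.Set.add s indicator else s) st.2
      (v, c)) (PySem.Set.empty, PySem.Set.empty)
  let vm_score : Int := PySem.Set.len found.1
  let cloud_run_score : Int := PySem.Set.len found.2
  if vm_score > cloud_run_score then "cloud_vm"
  else if cloud_run_score > vm_score then "cloud_run"
  else "generic"

-- ===== PRECONDITION & SPEC =====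
def Spec_detect_deployment_type_py (outputs : List (String × String)) (out : String) : Prop := out = detect_deployment_type_py_alt outputs
instance (outputs : List (String × String)) (out : String) : Decidable (Spec_detect_deployment_type_py outputs out) := by unfold Spec_detect_deployment_type_py; infer_instance

-- ===== CLAIM (what is proved, stated in full; the proofs are below) =====
def Claim_equal_detect_deployment_type_py : Prop := ∀ (outputs : List (String × String)), Dom_detect_deployment_type_py outputs → Spec_detect_deployment_type_py outputs (detect_deployment_type_py outputs)

-- ===== LEMMAS AND PROOFS =====

-- the inner per-key pass over a list of indicators
def pvInner (q : String → Bool) (inds : List String) (s : PySem.Set String) : PySem.Set String :=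
  inds.foldl (fun s indicator => if q indicator then PySem.Set.add s indicator else s) s

-- the outer pass over the keys, one indicator list
def pvOuter (inds keys : List String) (s : PySem.Set String) : PySem.Set String :=
  keys.foldl (fun s key => pvInner (fun i => PySem.Str.isIn i (PySem.Str.lower key)) inds s) s

theorem pvInner_mem (q : String → Bool) (inds : List String) (s : PySem.Set String) (x : String) :
    x ∈ pvInner q inds s ↔ x ∈ s ∨ (x ∈ inds ∧ q x = true) := by
  induction inds generalizing s with
  | nil => simp [pvInner]
  | cons i t ih =>
    simp only [pvInner, List.foldl_cons] at *
    by_cases h : q i = true <;> simp [h, ih, PySem.Set.mem_add, List.mem_cons] <;> aesop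

theorem pvInner_nodup (q : String → Bool) (inds : List String) (s : PySem.Set String)
    (hs : s.Nodup) : (pvInner q inds s).Nodup := by
  induction inds generalizing s with
  | nil => simpa [pvInner]
  | cons i t ih =>
    simp only [pvInner, List.foldl_cons] at *
    by_cases h : q i = true <;> simp [h]
    · exact ih _ (PySem.Set.nodup_add _ _ hs)
    · exact ih _ hs

theorem pvOuter_mem (inds keys : List String) (s : PySem.Set String) (x : String) :
    x ∈ pvOuter inds keys s ↔
      x ∈ s ∨ (x ∈ inds ∧ ∃ k ∈ keys, PySem.Str.isIn x (PySem.Str.lower k) = true) := by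
  induction keys generalizing s with
  | nil => simp [pvOuter]
  | cons k t ih =>
    simp only [pvOuter, List.foldl_cons] at *
    rw [ih, pvInner_mem]
    aesop

theorem pvOuter_nodup (inds keys : List String) (s : PySem.Set String)
    (hs : s.Nodup) : (pvOuter inds keys s).Nodup := by
  induction keys generalizing s with
  | nil => simpa [pvOuter]
  | cons k t ih =>
    simp only [pvOuter, List.foldl_cons] at *
    exact ih _ (pvInner_nodup _ _ _ hs)

-- B's pair fold splits into two independent single-set folds
theorem pvPair_split (vmInds crInds keys : List String) (s t : PySem.Set String) :
    keys.foldl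
      (fun (st : PySem.Set String × PySem.Set String) key =>
        let low := PySem.Str.lower key
        let v := vmInds.foldl (fun s indicator =>
          if PySem.Str.isIn indicator low then PySem.Set.add s indicator else s) st.1
        let c := crInds.foldl (fun s indicator =>
          if PySem.Str.isIn indicator low then PySem.Set.add s indicator else s) st.2
        (v, c)) (s, t)
      = (pvOuter vmInds keys s, pvOuter crInds keys t) := by
  induction keys generalizing s t with
  | nil => simp [pvOuter]
  | cons k rest ih => simp only [List.foldl_cons, pvOuter, pvInner] at *; exact ih _ _

-- A's counting fold is the length of a filter
theorem pvCount_filter (q : String → Bool) (inds : List String) (a : Int) :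
    inds.foldl (fun (acc : Int) indicator => if q indicator then acc + 1 else acc) a
      = a + ((inds.filter q).length : Int) := by
  induction inds generalizing a with
  | nil => simp
  | cons i t ih =>
    simp only [List.foldl_cons, List.filter_cons]
    by_cases h : q i = true
    · simp [h, ih]; omega
    · simp [h, ih]

-- the two scores agree: the found-set size equals A's count of matching indicators
theorem pvScore_eq (inds keys : List String) (hnd : inds.Nodup) :
    (PySem.Set.len (pvOuter inds keys PySem.Set.empty) : Int)
      = inds.foldl (fun (acc : Int) indicator =>
          if keys.any (fun key => PySem.Str.isIn indicator (PySem.Str.lower key)) then acc + 1 else acc) 0 := by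
  rw [pvCount_filter (fun indicator => keys.any fun key => PySem.Str.isIn indicator (PySem.Str.lower key)) inds 0]
  have hperm : (pvOuter inds keys PySem.Set.empty).Perm
      (inds.filter (fun indicator => keys.any (fun key => PySem.Str.isIn indicator (PySem.Str.lower key)))) := by
    rw [List.perm_ext_iff_of_nodup (pvOuter_nodup _ _ _ (by simp [PySem.Set.empty]))
      (List.Nodup.filter _ hnd)]
    intro x
    rw [pvOuter_mem]
    simp [PySem.Set.empty, List.mem_filter, List.any_eq_true]
  simpa [PySem.Set.len] using hperm.length_eq

-- ===== VERDICT (by name: the statement is the Claim_ definition above) =====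
theorem detect_deployment_type_py_spec : Claim_equal_detect_deployment_type_py := by
  intro outputs _
  unfold Spec_detect_deployment_type_py detect_deployment_type_py detect_deployment_type_py_alt
  simp only [pvPair_split]
  rw [pvScore_eq _ _ (by decide), pvScore_eq _ _ (by decide)]
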